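-- pv_equiv track=rewrite | github.com/bioinf-rnrmu-stotoshka/1-function-public-SvyatLeWin | l1to0809.py | rrr
-- ===== SOURCE A (Python) =====
-- def rrr(n, k, memo=None):
--     assert isinstance(n, int) and isinstance(k, int), 'введены не числа'
--     assert n > 0 and k > 0, 'введены отрицательные числа'
--     if memo is None:
--         memo = {}
--     if n in memo:
--         return memo[n]
--     if n == 1 or n == 2:
--         memo[n] = 1
--     if n == 1 or n == 2:
--         return 1
--     return rrr(n - 1, k, memo) + k * rrr(n - 2, k, memo)
-- ===== SOURCE B (Python) =====
-- def rrr(n, k, memo=None):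
--     assert isinstance(n, int) and isinstance(k, int), 'введены не числа'
--     assert n > 0 and k > 0, 'введены отрицательные числа'
--     if memo is None:
--         memo = {}
--     # bottom-up: f(m) = memo[m] if overridden, else 1 for m<=2, else f(m-1)+k*f(m-2)
--     prev2, prev1 = 0, 0
--     for m in range(1, n + 1):
--         if m in memo:
--             cur = memo[m]
--         elif m <= 2:
--             cur = 1
--         else:
--             cur = prev1 + k * prev2
--         prev2, prev1 = prev1, cur
--     return prev1
-- ===== Notes on version B (the rewrite author's own statement) =====
-- stated objective: alternative
-- what changed: replaces the top-down recursion (whose memo only ever caches the base cases, so it is exponential when memo does not cover) with a bottom-up loop keeping the last two values; intended as asymptotically faster, but a timing run could not confirm it (A timed out at some sizes; at the largest size both finished B read 3.68x on too few samples)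
import Mathlib
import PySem

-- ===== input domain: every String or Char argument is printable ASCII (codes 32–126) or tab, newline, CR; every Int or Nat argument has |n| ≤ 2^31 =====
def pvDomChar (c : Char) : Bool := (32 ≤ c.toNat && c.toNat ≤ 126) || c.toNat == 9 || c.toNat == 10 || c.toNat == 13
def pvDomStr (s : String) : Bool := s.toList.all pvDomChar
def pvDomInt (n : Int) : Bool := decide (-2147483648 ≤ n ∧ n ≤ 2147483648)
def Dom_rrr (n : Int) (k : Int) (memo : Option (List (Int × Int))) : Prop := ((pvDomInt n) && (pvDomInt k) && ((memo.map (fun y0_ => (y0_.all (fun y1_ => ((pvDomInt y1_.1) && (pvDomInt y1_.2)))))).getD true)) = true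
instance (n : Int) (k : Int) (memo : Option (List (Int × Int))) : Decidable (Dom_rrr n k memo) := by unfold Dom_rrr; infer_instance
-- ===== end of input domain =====

-- B replaces A's top-down recursion (whose memo only ever caches the base cases) with a
-- bottom-up loop keeping the last two values (intended as asymptotically faster; the timing
-- run could not confirm this, so no speed is claimed). Equivalence is about the RETURN value
-- only: A mutates the caller's memo by inserting the base entries 1,2 -> 1; B does not.


-- ===== PORT A =====
-- recursive body of A; threads the mutated memo through the calls exactly as Python does.
-- The 'n ≤ 2' branch is a totality guard only: it is reachable only for n ≤ 0, where the
-- Python assert has already raised (outside Pre_rrr).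
def rrrGo (k : Int) (n : Int) (memo : PySem.Dict Int Int) : Int × PySem.Dict Int Int :=
  match memo.get? n with
  | some v => (v, memo)
  | none =>
    let memo1 := if n = 1 ∨ n = 2 then memo.insert n 1 else memo
    if n = 1 ∨ n = 2 then (1, memo1)
    else if n ≤ 2 then (0, memo1)   -- unreachable under Pre_rrr (assert n > 0)
    else
      let p1 := rrrGo k (n - 1) memo1
      let p2 := rrrGo k (n - 2) p1.2
      (p1.1 + k * p2.1, p2.2)
termination_by n.toNat
decreasing_by all_goals omega

def rrr (n : Int) (k : Int) (memo : Option (List (Int × Int))) : Int :=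
  if n ≤ 0 ∨ k ≤ 0 then 0   -- Python: assert raises here (excluded by Pre_rrr)
  else (rrrGo k n (PySem.Dict.mk (memo.getD []))).1

-- ===== PORT B =====
def rrr_alt (n : Int) (k : Int) (memo : Option (List (Int × Int))) : Int :=
  if n ≤ 0 ∨ k ≤ 0 then 0   -- Python: assert raises here (excluded by Pre_rrr)
  else
    ((PySem.List.pyRange 1 (n + 1) 1).foldl
      (fun (ab : Int × Int) i =>
        (ab.2,
          match (PySem.Dict.mk (memo.getD [])).get? i with
          | some v => v
          | none => if i ≤ 2 then 1 else ab.2 + k * ab.1))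
      (0, 0)).2

-- ===== PRECONDITION & SPEC =====
-- exactly the inputs where A's asserts pass (A raises AssertionError otherwise)
def Pre_rrr (n : Int) (k : Int) (memo : Option (List (Int × Int))) : Prop := 0 < n ∧ 0 < k
instance (n : Int) (k : Int) (memo : Option (List (Int × Int))) : Decidable (Pre_rrr n k memo) := by unfold Pre_rrr; infer_instance
def pvWitness_rrr : Int × Int × (Option (List (Int × Int))) := (7, 2, some [(4, 9)])

def Spec_rrr (n : Int) (k : Int) (memo : Option (List (Int × Int))) (out : Int) : Prop := out = rrr_alt n k memo
instance (n : Int) (k : Int) (memo : Option (List (Int × Int))) (out : Int) : Decidable (Spec_rrr n k memo out) := by unfold Spec_rrr; infer_instance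

-- ===== CLAIM (what is proved, stated in full; the proofs are below) =====
def Claim_equal_rrr : Prop := ∀ (n : Int) (k : Int) (memo : Option (List (Int × Int))), Dom_rrr n k memo → Pre_rrr n k memo → Spec_rrr n k memo (rrr n k memo)

-- ===== LEMMAS AND PROOFS =====

-- the mathematical recurrence both ports compute, relative to the ORIGINAL memo m0
def pvF (k : Int) (m0 : PySem.Dict Int Int) (x : Nat) : Int :=
  match m0.get? (x : Int) with
  | some v => v
  | none => if x ≤ 2 then 1 else pvF k m0 (x - 1) + k * pvF k m0 (x - 2)
termination_by x
decreasing_by all_goals omega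

-- invariant: the threaded memo differs from m0 only by base entries 1,2 ↦ 1
def pvAgree (m0 m : PySem.Dict Int Int) : Prop :=
  ∀ x : Int, m.get? x = m0.get? x ∨ ((x = 1 ∨ x = 2) ∧ m.get? x = some 1 ∧ m0.get? x = none)

theorem pvAgree_refl (m0 : PySem.Dict Int Int) : pvAgree m0 m0 := fun _ => Or.inl rfl

theorem rrrGo_spec (k : Int) (m0 : PySem.Dict Int Int) :
    ∀ x : Nat, 1 ≤ x → ∀ m : PySem.Dict Int Int, pvAgree m0 m →
      (rrrGo k (x : Int) m).1 = pvF k m0 x ∧ pvAgree m0 (rrrGo k (x : Int) m).2 := by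
  intro x
  induction x using Nat.strong_induction_on with
  | _ x ih =>
    intro hx m hag
    rw [rrrGo, pvF]
    rcases hmem : m.get? (x : Int) with _ | v
    · -- m has no entry: neither does m0
      have hm0 : m0.get? (x : Int) = none := by
        rcases hag (x : Int) with h | ⟨_, h1, _⟩
        · rw [← h]; exact hmem
        · rw [hmem] at h1; cases h1
      rw [hm0]
      by_cases hb : (x : Int) = 1 ∨ (x : Int) = 2
      · -- base case: insert and return 1
        have hx2 : x ≤ 2 := by omega
        simp only [if_pos hb, if_pos hx2]
        refine ⟨by trivial, ?_⟩
        intro y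
        by_cases hy : y = (x : Int)
        · subst hy
          exact Or.inr ⟨hb, by rw [PySem.Dict.get?_insert_self], hm0⟩
        · rw [PySem.Dict.get?_insert_of_ne m 1 hy]
          exact hag y
      · -- recursive case: x ≥ 3
        have hx3 : 3 ≤ x := by omega
        have hle : ¬ ((x : Int) ≤ 2) := by omega
        have hx2 : ¬ (x ≤ 2) := by omega
        simp only [if_neg hb, if_neg hle, if_neg hx2]
        have h1 : ((x : Int) - 1) = ((x - 1 : Nat) : Int) := by omega
        have h2 : ((x : Int) - 2) = ((x - 2 : Nat) : Int) := by omega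
        rw [h1, h2]
        obtain ⟨e1, a1⟩ := ih (x - 1) (by omega) (by omega) m hag
        obtain ⟨e2, a2⟩ := ih (x - 2) (by omega) (by omega) _ a1
        exact ⟨by rw [e1, e2], a2⟩
    · -- memo hit
      refine ⟨?_, hag⟩
      rcases hag (x : Int) with h | ⟨hb, h1, h0⟩
      · rw [hmem] at h; rw [← h]
      · rw [hmem] at h1
        have hv : v = 1 := by cases h1; rfl
        have hx2 : x ≤ 2 := by omega
        rw [h0, hv, if_pos hx2]

-- B's fold step, named for the proofs
def pvStep (k : Int) (m0 : PySem.Dict Int Int) (ab : Int × Int) (i : Int) : Int × Int :=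
  (ab.2,
    match m0.get? i with
    | some v => v
    | none => if i ≤ 2 then 1 else ab.2 + k * ab.1)

theorem pvStep_base (k : Int) (m0 : PySem.Dict Int Int) (ab : Int × Int) (x : Nat)
    (h1 : 1 ≤ x) (h2 : x ≤ 2) : (pvStep k m0 ab (x : Int)).2 = pvF k m0 x := by
  rw [pvStep, pvF]
  rcases m0.get? (x : Int) with _ | v
  · have : (x : Int) ≤ 2 := by omega
    simp [this, h2]
  · rfl

theorem pvFold_spec (k : Int) (m0 : PySem.Dict Int Int) :
    ∀ x : Nat, 2 ≤ x →
      (PySem.List.pyRange 1 ((x : Int) + 1) 1).foldl (pvStep k m0) (0, 0)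
        = (pvF k m0 (x - 1), pvF k m0 x) := by
  intro x hx
  induction x, hx using Nat.le_induction with
  | base =>
    have hcast2 : (((2 : Nat) : Int)) = (2 : Int) := by norm_num
    have hr : PySem.List.pyRange 1 ((2 : Int) + 1) 1 = [1, 2] := by decide
    rw [hcast2]
    have e1 := pvStep_base k m0 (0, 0) 1 (by omega) (by omega)
    have e2 := pvStep_base k m0 (pvStep k m0 (0, 0) 1) 2 (by omega) (by omega)
    rw [hr]
    simp only [List.foldl]
    refine Prod.ext ?_ ?_
    · show (pvStep k m0 (0, 0) (1 : Int)).2 = pvF k m0 1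
      exact_mod_cast e1
    · show (pvStep k m0 _ (2 : Int)).2 = pvF k m0 2
      exact_mod_cast e2
  | succ x hx2 ih =>
    have hsplit : PySem.List.pyRange 1 (((x + 1 : Nat) : Int) + 1) 1
        = PySem.List.pyRange 1 ((x : Int) + 1) 1 ++ [(x : Int) + 1 - 1 + 1] := by
      rw [PySem.List.pyRange_one_succ_right (by omega)]
      congr 1
      push_cast; ring_nf
    rw [hsplit, List.foldl_append, ih]
    simp only [List.foldl]
    have hi : (x : Int) + 1 - 1 + 1 = ((x + 1 : Nat) : Int) := by push_cast; ring
    rw [hi]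
    refine Prod.ext ?_ ?_
    · show pvF k m0 x = pvF k m0 (x + 1 - 1)
      congr 1
    · show (pvStep k m0 (pvF k m0 (x - 1), pvF k m0 x) _).2 = pvF k m0 (x + 1)
      rw [pvStep]
      conv_rhs => rw [pvF]
      rcases m0.get? ((x + 1 : Nat) : Int) with _ | v
      · have hle : ¬ (((x + 1 : Nat) : Int) ≤ 2) := by omega
        have hle' : ¬ (x + 1 ≤ 2) := by omega
        simp only [if_neg hle, if_neg hle']
        have e1 : x + 1 - 1 = x := by omega
        have e2 : x + 1 - 2 = x - 1 := by omega
        rw [e1, e2]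
      · rfl

theorem rrr_alt_eq_pvF (n : Int) (k : Int) (memo : Option (List (Int × Int)))
    (hn : 0 < n) (hk : 0 < k) :
    rrr_alt n k memo = pvF k (PySem.Dict.mk (memo.getD [])) n.toNat := by
  rw [rrr_alt]
  have hg : ¬ (n ≤ 0 ∨ k ≤ 0) := by omega
  rw [if_neg hg]
  set m0 := PySem.Dict.mk (memo.getD []) with hm0
  have hfold : (PySem.List.pyRange 1 (n + 1) 1).foldl
      (fun (ab : Int × Int) i =>
        (ab.2,
          match m0.get? i with
          | some v => v
          | none => if i ≤ 2 then 1 else ab.2 + k * ab.1))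
      (0, 0) = (PySem.List.pyRange 1 (n + 1) 1).foldl (pvStep k m0) (0, 0) := rfl
  rw [hfold]
  by_cases h1 : n = 1
  · subst h1
    have hr : PySem.List.pyRange 1 ((1 : Int) + 1) 1 = [1] := by decide
    rw [hr]
    simp only [List.foldl]
    have := pvStep_base k m0 (0, 0) 1 (by omega) (by omega)
    show (pvStep k m0 (0, 0) (1 : Int)).2 = pvF k m0 (1 : Int).toNat
    exact_mod_cast this
  · have hx : 2 ≤ n.toNat := by omega
    have hcast : ((n.toNat : Int)) = n := by omega
    have := pvFold_spec k m0 n.toNat hx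
    rw [hcast] at this
    rw [this]

-- ===== VERDICT (by name: the statement is the Claim_ definition above) =====
theorem rrr_spec : Claim_equal_rrr := by
  intro n k memo _ hpre
  unfold Spec_rrr
  obtain ⟨hn, hk⟩ := hpre
  have hg : ¬ (n ≤ 0 ∨ k ≤ 0) := by omega
  rw [rrr, if_neg hg, rrr_alt_eq_pvF n k memo hn hk]
  have hcast : ((n.toNat : Int)) = n := by omega
  have := (rrrGo_spec k (PySem.Dict.mk (memo.getD [])) n.toNat (by omega)
    (PySem.Dict.mk (memo.getD [])) (pvAgree_refl _)).1
  rw [hcast] at this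
  exact this
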